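-- pv_equiv track=rewrite | github.com/doh0106/programmers | 프로그래머스/lv2/87390. n＾2 배열 자르기/n＾2 배열 자르기.py | solution
-- ===== SOURCE A (Python) =====
-- def solution(n, left, right):
--     result = []
--     for idx in range(left, right+1):
--         new_col = idx%n
--         new_row = idx//n
--         if new_row>=new_col:
--             result.append(new_row+1)
--         else:
--             if not result:
--                 result.append(new_col+1)
--             else:
--                 result.append(result[-1]+1)
--     return result
-- ===== SOURCE B (Python) =====
-- def solution(n, left, right):
--     out = []
--     first, last = left // n, right // n
--     for r in range(first, last + 1):
--         lo = left % n if r == first else 0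
--         hi = right % n if r == last else n - 1
--         chunk = [r + 1] * (min(hi, r) - lo + 1) + list(range(max(lo, r + 1) + 1, hi + 2))
--         out += chunk
--     return out
-- ===== Notes on version B (the rewrite author's own statement) =====
-- stated objective: alternative
-- what changed: B replaces A's per-element loop (with its result[-1]+1 chaining) by a per-row block construction: for each row r from left//n to right//n it appends a constant block of r+1's and an increasing block c+1, clipping the first and last rows; Pre_ restricts to the problem's natural domain (grid size n >= 1 and slice start left >= 0, plus every empty slice right < left), outside which A either raises (n = 0) or returns chained floor-division values the row decomposition does not apply to.
-- outside the precondition, e.g. on solution(7, -19, -11): A returns [3, 4, 5, 6, 7, 8, 9, 10, 11], B returns [3, 4, 5, 6, 7, 1, 2, 3, 4]; on solution(-3, 14, 16): A returns [0, 1, 2], B returns []; on solution(0, 0, 1): A raises ZeroDivisionError, B raises ZeroDivisionError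
import Mathlib
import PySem

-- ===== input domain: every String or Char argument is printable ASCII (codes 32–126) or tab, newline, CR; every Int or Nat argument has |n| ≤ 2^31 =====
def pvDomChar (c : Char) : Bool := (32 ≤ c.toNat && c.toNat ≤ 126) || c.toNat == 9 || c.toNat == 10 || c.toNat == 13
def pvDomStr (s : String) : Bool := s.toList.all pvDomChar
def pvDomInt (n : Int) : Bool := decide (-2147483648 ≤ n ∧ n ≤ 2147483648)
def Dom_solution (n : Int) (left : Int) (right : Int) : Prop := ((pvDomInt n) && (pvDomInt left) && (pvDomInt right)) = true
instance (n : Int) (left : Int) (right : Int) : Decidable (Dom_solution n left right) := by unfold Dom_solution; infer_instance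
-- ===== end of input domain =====

-- B builds the answer row by row (a constant block then an increasing block per row) instead of
-- A's per-element loop with result[-1]+1 chaining.

-- ===== PORT A =====
def solution (n : Int) (left : Int) (right : Int) : List Int :=
  (PySem.List.pyRange left (right + 1) 1).foldl (fun result idx =>
    let new_col := PySem.Int.mod idx n
    let new_row := PySem.Int.floordiv idx n
    if new_row ≥ new_col then result ++ [new_row + 1]
    else if result = [] then result ++ [new_col + 1]
    else result ++ [PySem.List.pyGetD result (-1) 0 + 1]) []
    -- result[-1]: guarded by 'result ≠ []', so pyGetD with any default is exact here

-- ===== PORT B =====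
def solution_alt (n : Int) (left : Int) (right : Int) : List Int :=
  let first := PySem.Int.floordiv left n
  let last := PySem.Int.floordiv right n
  (PySem.List.pyRange first (last + 1) 1).foldl (fun out r =>
    let lo := if r = first then PySem.Int.mod left n else 0
    let hi := if r = last then PySem.Int.mod right n else n - 1
    let chunk := List.replicate (min hi r - lo + 1).toNat (r + 1) ++
                 PySem.List.pyRange (max lo (r + 1) + 1) (hi + 2) 1
    out ++ chunk) []

-- ===== PRECONDITION & SPEC =====
-- Pre_ restricts to the problem's natural domain — a positive grid size n and a nonnegative slice
-- start left (the problem statement guarantees 1 ≤ n and 0 ≤ left ≤ right), plus every empty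
-- slice right < left; for n = 0 A raises ZeroDivisionError when left ≤ right, and for n < 0 or
-- left < 0 (with a nonempty slice) the flattened-grid reading is meaningless and B's row
-- decomposition does not apply to A's chained values there.
def Pre_solution (n : Int) (left : Int) (right : Int) : Prop := 0 < n ∧ (0 ≤ left ∨ right < left)
instance (n : Int) (left : Int) (right : Int) : Decidable (Pre_solution n left right) := by unfold Pre_solution; infer_instance
def pvWitness_solution : Int × Int × Int := (3, 2, 7)

def Spec_solution (n : Int) (left : Int) (right : Int) (out : List Int) : Prop := out = solution_alt n left right
instance (n : Int) (left : Int) (right : Int) (out : List Int) : Decidable (Spec_solution n left right out) := by unfold Spec_solution; infer_instance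

-- ===== CLAIM (what is proved, stated in full; the proofs are below) =====
def Claim_equal_solution : Prop := ∀ (n : Int) (left : Int) (right : Int), Dom_solution n left right → Pre_solution n left right → Spec_solution n left right (solution n left right)

-- ===== LEMMAS AND PROOFS =====

-- the common specification list: max(i//n, i%n) + 1 for i in [left, b)
def pvVal (n i : Int) : Int := max (i / n) (i % n) + 1
def pvSpecList (n left b : Int) : List Int := (PySem.List.pyRange left b 1).map (pvVal n)

lemma pv_divmod (n a c : Int) (hn : 0 < n) (h0 : 0 ≤ c) (h1 : c < n) :
    (a * n + c) / n = a ∧ (a * n + c) % n = c := by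
  constructor
  · rw [add_comm, Int.add_mul_ediv_right _ _ (by omega : n ≠ 0),
      Int.ediv_eq_zero_of_lt h0 h1]; omega
  · rw [add_comm, Int.add_mul_emod_self_right, Int.emod_eq_of_lt h0 h1]

lemma pv_chain (n a : Int) (hn : 0 < n) (ha : 1 ≤ a) (h : a / n < a % n) :
    pvVal n (a - 1) + 1 = pvVal n a := by
  have hq : 0 ≤ a / n := Int.ediv_nonneg (by omega) hn.le
  have hr : a % n < n := Int.emod_lt_of_pos a hn
  have hd : a / n * n + a % n = a := by
    have := Int.emod_add_mul_ediv a n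
    nlinarith [mul_comm n (a / n)]
  have h1 : (a / n) * n + (a % n - 1) = a - 1 := by omega
  have h2 := pv_divmod n (a / n) (a % n - 1) hn (by omega) (by omega)
  rw [h1] at h2
  simp only [pvVal, h2.1, h2.2]
  omega

lemma pvSpecList_succ (n left b : Int) (h : left ≤ b) :
    pvSpecList n left (b + 1) = pvSpecList n left b ++ [pvVal n b] := by
  unfold pvSpecList
  rw [PySem.List.pyRange_one_succ_right h, List.map_append]; rfl

lemma pvSpecList_nil (n left b : Int) (h : b ≤ left) : pvSpecList n left b = [] := by
  unfold pvSpecList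
  rw [PySem.List.pyRange_one_eq_nil h]; rfl

lemma A_loop (n left : Int) (hn : 0 < n) (hl : 0 ≤ left) (k : Nat) :
    (PySem.List.pyRange left (left + k) 1).foldl (fun result idx =>
      let new_col := PySem.Int.mod idx n
      let new_row := PySem.Int.floordiv idx n
      if new_row ≥ new_col then result ++ [new_row + 1]
      else if result = [] then result ++ [new_col + 1]
      else result ++ [PySem.List.pyGetD result (-1) 0 + 1]) []
    = pvSpecList n left (left + k) := by
  induction k with
  | zero =>
    rw [show ((left + (0:Nat) : Int)) = left by push_cast; ring]
    rw [PySem.List.pyRange_one_eq_nil le_rfl, pvSpecList_nil n left left le_rfl]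
    rfl
  | succ k ih =>
    have hk : left ≤ left + (k : Int) := by omega
    rw [show ((left + ((k+1 : Nat)) : Int)) = (left + (k : Int)) + 1 by push_cast; ring]
    rw [PySem.List.pyRange_one_succ_right hk, List.foldl_append, ih,
      pvSpecList_succ n left _ hk]
    set a := left + (k : Int) with ha
    have ha0 : 0 ≤ a := by omega
    simp only [List.foldl_cons, List.foldl_nil]
    simp only [PySem.Int.mod_eq_emod_of_pos hn, PySem.Int.floordiv_eq_ediv_of_pos hn]
    by_cases hbr : a / n ≥ a % n
    · simp only [if_pos hbr]
      congr 1
      simp [pvVal, max_eq_left hbr]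
    · simp only [if_neg hbr]
      push Not at hbr
      rcases Nat.eq_zero_or_pos k with hk0 | hkpos
      · subst hk0
        have : pvSpecList n left a = [] := pvSpecList_nil n left a (by omega)
        rw [this]
        simp only [List.nil_append]
        simp [pvVal, max_eq_right hbr.le]
      · have h1a : left ≤ a - 1 := by omega
        have hsp : pvSpecList n left a = pvSpecList n left (a - 1) ++ [pvVal n (a - 1)] := by
          have := pvSpecList_succ n left (a - 1) h1a
          rw [sub_add_cancel] at this
          exact this
        rw [hsp]
        have hne : pvSpecList n left (a - 1) ++ [pvVal n (a - 1)] ≠ [] := by simp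
        simp only [if_neg hne]
        rw [PySem.List.pyGetD_neg_one_append_singleton]
        congr 2
        exact pv_chain n a hn (by omega) hbr

lemma A_eq (n left right : Int) (hn : 0 < n) (hd : 0 ≤ left ∨ right < left) :
    solution n left right = pvSpecList n left (right + 1) := by
  unfold solution
  by_cases h : left ≤ right
  · have hl : 0 ≤ left := by omega
    rw [show (right + 1) = left + (((right + 1 - left).toNat : Nat) : Int) by omega]
    exact A_loop n left hn hl _
  · rw [PySem.List.pyRange_one_eq_nil (by omega), pvSpecList_nil n left _ (by omega)]
    rfl

lemma pvSpecList_split (n x y z : Int) (h1 : x ≤ y) (h2 : y ≤ z) :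
    pvSpecList n x z = pvSpecList n x y ++ pvSpecList n y z := by
  unfold pvSpecList
  rw [PySem.List.pyRange_one_append x y z h1 h2, List.map_append]

lemma pv_val_at (n a c : Int) (hn : 0 < n) (h0 : 0 ≤ c) (h1 : c < n) :
    pvVal n (a * n + c) = max a c + 1 := by
  obtain ⟨hq, hr⟩ := pv_divmod n a c hn h0 h1
  simp [pvVal, hq, hr]

-- one row's chunk is exactly the spec list of its index segment
lemma chunk_eq (n a lo hi : Int) (hn : 0 < n) (h0 : 0 ≤ lo) (h1 : hi < n) :
    List.replicate (min hi a - lo + 1).toNat (a + 1) ++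
      PySem.List.pyRange (max lo (a + 1) + 1) (hi + 2) 1
    = pvSpecList n (a * n + lo) (a * n + hi + 1) := by
  apply List.ext_getElem
  · simp [pvSpecList, PySem.List.length_pyRange_one]
    omega
  · intro k hk1 hk2
    have hR : (List.replicate (min hi a - lo + 1).toNat (a + 1)).length
        = (min hi a - lo + 1).toNat := List.length_replicate
    have hlen2 : k < (a * n + hi + 1 - (a * n + lo)).toNat := by
      simpa [pvSpecList, PySem.List.length_pyRange_one] using hk2
    have hrhs : (pvSpecList n (a * n + lo) (a * n + hi + 1))[k] = pvVal n (a * n + (lo + k)) := by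
      simp only [pvSpecList]
      rw [List.getElem_map, PySem.List.getElem_pyRange_one]
      congr 1
      ring
    rw [hrhs, pv_val_at n a (lo + k) hn (by omega) (by omega), List.getElem_append]
    split
    · next h =>
      rw [List.getElem_replicate]
      rw [hR] at h
      rw [max_eq_left (by omega : (lo + (k : Int)) ≤ a)]
    · next h =>
      rw [PySem.List.getElem_pyRange_one]
      rw [hR] at h
      rw [max_eq_right (by omega : a ≤ lo + (k : Int))]
      have hmx2 : max lo (a + 1) = if a + 1 ≤ lo then lo else a + 1 := by
        rcases max_cases lo (a + 1) with ⟨e1, e2⟩ | ⟨e1, e2⟩ <;> rw [e1] <;> omega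
      rw [hmx2]
      split <;> omega

lemma B_loop (n left right : Int) (hn : 0 < n) (hlr : left ≤ right) (k : Nat) :
    ∀ a : Int, left / n ≤ a → a ≤ right / n + 1 → (right / n + 1 - a).toNat = k →
    ∀ acc : List Int,
    (PySem.List.pyRange a (right / n + 1) 1).foldl
      (fun out r =>
        let lo := if r = left / n then left % n else 0
        let hi := if r = right / n then right % n else n - 1
        let chunk := List.replicate (min hi r - lo + 1).toNat (r + 1) ++
                     PySem.List.pyRange (max lo (r + 1) + 1) (hi + 2) 1
        out ++ chunk) acc
    = acc ++ pvSpecList n (max left (a * n)) (right + 1) := by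
  have hrd : right / n * n + right % n = right := by
    have := Int.emod_add_mul_ediv right n
    nlinarith [mul_comm n (right / n)]
  have hld : left / n * n + left % n = left := by
    have := Int.emod_add_mul_ediv left n
    nlinarith [mul_comm n (left / n)]
  have hrm0 : 0 ≤ right % n := Int.emod_nonneg right (by omega)
  have hrm1 : right % n < n := Int.emod_lt_of_pos right hn
  have hlm0 : 0 ≤ left % n := Int.emod_nonneg left (by omega)
  have hlm1 : left % n < n := Int.emod_lt_of_pos left hn
  induction k with
  | zero =>
    intro a _ h2 h3 acc
    have ha : a = right / n + 1 := by omega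
    rw [ha, PySem.List.pyRange_one_eq_nil le_rfl]
    rw [pvSpecList_nil n _ _ (by
      have : right + 1 ≤ (right / n + 1) * n := by nlinarith
      exact le_max_of_le_right this)]
    simp
  | succ k ih =>
    intro a h1 h2 h3 acc
    have halast : a ≤ right / n := by omega
    rw [PySem.List.pyRange_one_cons (by omega), List.foldl_cons]
    rw [ih (a + 1) (by omega) (by omega) (by omega)]
    -- now combine chunk of row a with the tail spec list
    have hfle : left / n ≤ right / n := by omega
    -- the chunk's segment start and end
    have hS : max left (a * n) = a * n + (if a = left / n then left % n else 0) := by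
      by_cases hf : a = left / n
      · rw [if_pos hf, hf]
        rw [max_eq_left (by omega)]
        omega
      · rw [if_neg hf]
        have : left / n + 1 ≤ a := by omega
        have : (left / n + 1) * n ≤ a * n := by nlinarith
        rw [max_eq_right (by nlinarith)]
        ring
    have hE : a * n + (if a = right / n then right % n else n - 1) + 1
        = min (right + 1) (a * n + n) := by
      by_cases hg : a = right / n
      · rw [if_pos hg, hg]
        rw [min_eq_left (by nlinarith)]
        omega
      · rw [if_neg hg]
        have : a + 1 ≤ right / n := by omega
        have : (a + 1) * n ≤ right / n * n := by nlinarith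
        rw [min_eq_right (by nlinarith)]
        ring
    have hlohi : (if a = left / n then left % n else 0)
        ≤ (if a = right / n then right % n else n - 1) + 1 := by
      split_ifs with hf hg hg2
      · have h12 : left / n * n = right / n * n := by rw [← hf, ← hg]
        omega
      · omega
      · omega
      · omega
    have h0lo : 0 ≤ (if a = left / n then left % n else 0) := by split_ifs <;> omega
    have h1hi : (if a = right / n then right % n else n - 1) < n := by split_ifs <;> omega
    have hck := chunk_eq n a (if a = left / n then left % n else 0)
      (if a = right / n then right % n else n - 1) hn h0lo h1hi
    simp only []
    rw [hck, ← hS]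
    have hSE : max left (a * n) ≤ a * n + (if a = right / n then right % n else n - 1) + 1 := by
      rw [hS]; omega
    have hEle : a * n + (if a = right / n then right % n else n - 1) + 1 ≤ right + 1 := by
      rw [hE]; exact min_le_left _ _
    have htail : pvSpecList n (max left ((a + 1) * n)) (right + 1)
        = pvSpecList n (a * n + (if a = right / n then right % n else n - 1) + 1) (right + 1) := by
      by_cases hg : a = right / n
      · have big1 : right + 1 ≤ (a + 1) * n := by
          have : a * n = right / n * n := by rw [hg]
          nlinarith
        have big2 : right + 1 ≤ a * n + (if a = right / n then right % n else n - 1) + 1 := by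
          rw [if_pos hg]
          have : a * n = right / n * n := by rw [hg]
          omega
        rw [pvSpecList_nil n _ _ (le_max_of_le_right big1), pvSpecList_nil n _ _ big2]
      · have hnlast : a + 1 ≤ right / n := by omega
        have hint : a * n + (if a = right / n then right % n else n - 1) + 1 = (a + 1) * n := by
          rw [if_neg hg]; ring
        have hlle : left ≤ (a + 1) * n := by
          have e1 : left / n + 1 ≤ a + 1 := by omega
          have e2 : (left / n + 1) * n ≤ (a + 1) * n := by nlinarith
          nlinarith
        rw [hint, max_eq_right hlle]
    rw [htail, pvSpecList_split n (max left (a * n))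
      (a * n + (if a = right / n then right % n else n - 1) + 1) (right + 1) hSE hEle,
      List.append_assoc]

lemma B_eq (n left right : Int) (hn : 0 < n) (hd : 0 ≤ left ∨ right < left) :
    solution_alt n left right = pvSpecList n left (right + 1) := by
  have hld : left / n * n + left % n = left := by
    have := Int.emod_add_mul_ediv left n
    nlinarith [mul_comm n (left / n)]
  have hrd : right / n * n + right % n = right := by
    have := Int.emod_add_mul_ediv right n
    nlinarith [mul_comm n (right / n)]
  have hlm0 : 0 ≤ left % n := Int.emod_nonneg left (by omega)
  have hlm1 : left % n < n := Int.emod_lt_of_pos left hn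
  have hrm0 : 0 ≤ right % n := Int.emod_nonneg right (by omega)
  have hrm1 : right % n < n := Int.emod_lt_of_pos right hn
  unfold solution_alt
  simp only [PySem.Int.floordiv_eq_ediv_of_pos hn, PySem.Int.mod_eq_emod_of_pos hn]
  by_cases hlr : left ≤ right
  · have hl : 0 ≤ left := by omega
    have hfl : left / n ≤ right / n := Int.ediv_le_ediv hn hlr
    rw [B_loop n left right hn hlr (right / n + 1 - left / n).toNat (left / n)
      le_rfl (by omega) (by omega) [], List.nil_append]
    congr 1
    exact max_eq_left (by nlinarith)
  · by_cases hfl : left / n = right / n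
    · rw [← hfl, PySem.List.pyRange_one_singleton, List.foldl_cons, List.foldl_nil]
      simp only []
      simp only [if_true, List.nil_append]
      rw [chunk_eq n (left / n) (left % n) (right % n) hn hlm0 hrm1]
      have h12 : left / n * n = right / n * n := by rw [hfl]
      have e2 : left / n * n + right % n + 1 = right + 1 := by omega
      rw [hld, e2]
    · have hle : right / n ≤ left / n := Int.ediv_le_ediv hn (by omega)
      have hlt : right / n + 1 ≤ left / n := by omega
      rw [PySem.List.pyRange_one_eq_nil hlt, pvSpecList_nil n left _ (by omega)]
      rfl

-- ===== VERDICT (by name: the statement is the Claim_ definition above) =====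
theorem solution_spec : Claim_equal_solution := by
  intro n left right _hdom hpre
  unfold Pre_solution at hpre
  obtain ⟨hn, hd⟩ := hpre
  unfold Spec_solution
  rw [A_eq n left right hn hd, B_eq n left right hn hd]
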